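-- pv_equiv track=rewrite | github.com/Sam-dev-eng/python-asignments | chapter 1 to 4/code_leveling.py | sum_non_numeric_and_numeric_strings
-- ===== SOURCE A (Python) =====
-- def value_error_for_list(element):
--    if type(element) != list:
--       raise ValueError
--
-- def value_error_for_string(element):
--    if type(element) != str:
--      raise ValueError
--
-- def add_number(number_one , number_two):
--   return number_one + number_two
--
-- def is_non_numeric_string(string):
--   if string.isdigit() == False:
--     return True
--   if string.isdigit() == True:
--     return False
--
-- def is_numeric_string(string):
--   return string.isdigit()
--
-- def ascii_of_words(words):
--   sum = 0
--   for char in words: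
--     sum += ord(char)
--   return sum
--
-- def sum_non_numeric_and_numeric_strings(list_of_elements):
--   from functools import reduce
--   value_error_for_list(list_of_elements)
--   for elements in list_of_elements:
--    value_error_for_string(elements)
--
--   list_of_words = list(filter(is_non_numeric_string,list_of_elements))
--   sum_of_each_ascii_word = list(map(ascii_of_words,list_of_words))
--   digits = list(filter(is_numeric_string,list_of_elements))
--   concat_digits_to_int = list(map(int,digits))
--   concat_to_one_list =   sum_of_each_ascii_word + concat_digits_to_int
--   return reduce(add_number , concat_to_one_list)
-- ===== SOURCE B (Python) =====
-- def value_error_for_list(element):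
--     if type(element) != list:
--         raise ValueError
--
-- def value_error_for_string(element):
--     if type(element) != str:
--         raise ValueError
--
-- def sum_non_numeric_and_numeric_strings(list_of_elements):
--     from functools import reduce
--     from operator import add
--     value_error_for_list(list_of_elements)
--     for element in list_of_elements:
--         value_error_for_string(element)
--     values = [int(e) if e.isdigit() else sum(ord(c) for c in e)
--               for e in list_of_elements]
--     return reduce(add, values)
-- ===== Notes on version B (the rewrite author's own statement) =====
-- stated objective: simpler
-- what changed: Replaces the filter/map/filter/map/concat chain (four traversals plus a list concatenation) by one pass that classifies each element inline (int(e) if digit string else ASCII sum), relying on commutativity of integer addition; the empty-list reduce TypeError is preserved.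
import Mathlib
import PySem

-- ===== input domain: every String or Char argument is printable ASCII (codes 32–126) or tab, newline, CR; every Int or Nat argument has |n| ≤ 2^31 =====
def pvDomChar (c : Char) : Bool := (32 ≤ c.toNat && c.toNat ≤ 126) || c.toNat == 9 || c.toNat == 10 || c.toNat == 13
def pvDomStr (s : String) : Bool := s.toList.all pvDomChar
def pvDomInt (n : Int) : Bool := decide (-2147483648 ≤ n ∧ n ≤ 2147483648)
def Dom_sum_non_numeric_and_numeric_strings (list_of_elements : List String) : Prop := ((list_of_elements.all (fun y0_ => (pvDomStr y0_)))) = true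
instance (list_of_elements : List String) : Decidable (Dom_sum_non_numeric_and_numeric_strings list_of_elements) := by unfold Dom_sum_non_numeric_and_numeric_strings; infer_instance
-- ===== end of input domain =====

-- B replaces A's filter/map/filter/map/concat chain by a single classifying pass (simpler; same result by commutativity of integer addition).


-- ===== PORT A =====
-- reduce(add_number, l): Python raises TypeError on []; that input is excluded by Pre_.
def pvReduceAdd (l : List Int) : Int :=
  match l with
  | [] => 0
  | h :: t => t.foldl (fun a b => a + b) h

-- ascii_of_words: sum = 0; for char in words: sum += ord(char)
def pvAsciiOfWords (words : String) : Int :=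
  words.toList.foldl (fun s c => s + (c.toNat : Int)) 0

def sum_non_numeric_and_numeric_strings (list_of_elements : List String) : Int :=
  let list_of_words := list_of_elements.filter (fun s => !(PySem.Str.strIsdigit s))
  let sum_of_each_ascii_word := list_of_words.map pvAsciiOfWords
  let digits := list_of_elements.filter (fun s => PySem.Str.strIsdigit s)
  let concat_digits_to_int := digits.map (fun s => (PySem.Int.ofStr? s).getD 0)
  let concat_to_one_list := sum_of_each_ascii_word ++ concat_digits_to_int
  pvReduceAdd concat_to_one_list

-- ===== PORT B =====
-- sum(ord(c) for c in e)
def pvAsciiAlt (e : String) : Int := (e.toList.map (fun c => (c.toNat : Int))).sum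

def sum_non_numeric_and_numeric_strings_alt (list_of_elements : List String) : Int :=
  let values := list_of_elements.map
    (fun e => if PySem.Str.strIsdigit e then (PySem.Int.ofStr? e).getD 0 else pvAsciiAlt e)
  pvReduceAdd values

-- ===== PRECONDITION & SPEC =====
-- Pre_ excludes only the empty list, on which A's reduce raises TypeError (no return value).
def Pre_sum_non_numeric_and_numeric_strings (list_of_elements : List String) : Prop :=
  list_of_elements ≠ []
instance (list_of_elements : List String) : Decidable (Pre_sum_non_numeric_and_numeric_strings list_of_elements) := by unfold Pre_sum_non_numeric_and_numeric_strings; infer_instance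

def pvWitness_sum_non_numeric_and_numeric_strings : List String := ["ab", "12"]

def Spec_sum_non_numeric_and_numeric_strings (list_of_elements : List String) (out : Int) : Prop := out = sum_non_numeric_and_numeric_strings_alt list_of_elements
instance (list_of_elements : List String) (out : Int) : Decidable (Spec_sum_non_numeric_and_numeric_strings list_of_elements out) := by unfold Spec_sum_non_numeric_and_numeric_strings; infer_instance

-- ===== CLAIM (what is proved, stated in full; the proofs are below) =====
def Claim_equal_sum_non_numeric_and_numeric_strings : Prop := ∀ (list_of_elements : List String), Dom_sum_non_numeric_and_numeric_strings list_of_elements → Pre_sum_non_numeric_and_numeric_strings list_of_elements → Spec_sum_non_numeric_and_numeric_strings list_of_elements (sum_non_numeric_and_numeric_strings list_of_elements)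

-- ===== LEMMAS AND PROOFS =====

theorem pvReduceAdd_eq_sum (l : List Int) : pvReduceAdd l = l.sum := by
  cases l with
  | nil => rfl
  | cons h t =>
    simp only [pvReduceAdd, List.sum_cons]
    induction t generalizing h with
    | nil => simp
    | cons x xs ih => simp only [List.foldl_cons, List.sum_cons, ih]; ring

theorem pvAscii_eq_alt (s : String) : pvAsciiOfWords s = pvAsciiAlt s := by
  unfold pvAsciiOfWords pvAsciiAlt
  generalize s.toList = l
  suffices h : ∀ (a : Int), l.foldl (fun s c => s + (c.toNat : Int)) a = a + (l.map (fun c => (c.toNat : Int))).sum by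
    simpa using h 0
  induction l with
  | nil => intro a; simp
  | cons c cs ih => intro a; simp [List.foldl_cons, ih]; ring

theorem main_sum (xs : List String) :
    ((xs.filter (fun s => !(PySem.Str.strIsdigit s))).map pvAsciiOfWords).sum
      + ((xs.filter (fun s => PySem.Str.strIsdigit s)).map (fun s => (PySem.Int.ofStr? s).getD 0)).sum
    = (xs.map (fun e => if PySem.Str.strIsdigit e then (PySem.Int.ofStr? e).getD 0 else pvAsciiAlt e)).sum := by
  induction xs with
  | nil => rfl
  | cons h t ih =>
    simp only [List.filter_cons, List.map_cons, List.sum_cons]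
    by_cases hd : PySem.Str.strIsdigit h = true
    · simp only [hd, Bool.not_true, if_false, if_true, Bool.false_eq_true, List.map_cons,
        List.sum_cons, ← ih]
      ring
    · simp only [Bool.not_eq_true] at hd
      simp only [hd, Bool.not_false, if_true, Bool.false_eq_true, if_false, List.map_cons,
        List.sum_cons, ← ih, pvAscii_eq_alt]
      ring

-- ===== VERDICT (by name: the statement is the Claim_ definition above) =====
theorem sum_non_numeric_and_numeric_strings_spec : Claim_equal_sum_non_numeric_and_numeric_strings := by
  intro xs _ _
  unfold Spec_sum_non_numeric_and_numeric_strings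
  unfold sum_non_numeric_and_numeric_strings sum_non_numeric_and_numeric_strings_alt
  simp only [pvReduceAdd_eq_sum, List.sum_append]
  exact main_sum xs
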